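-- pv_equiv track=rewrite | github.com/pypi-data/pypi-mirror-225 | packages/CRISPR-HMM/CRISPR_HMM-1.0.0.tar.gz/CRISPR_HMM-1.0.0/crispr_hmm/util.py | find_all_alignment_of_state
-- ===== SOURCE A (Python) =====
-- def find_all_alignment_of_state(aln_list,state,pos):
--     """
--     Find all alignment between sequence s and t containing the
--     hidden state specified by state and position pos.
--
--     :param list aln_list: .
--
--     :param str t: The second sequence.
--
--     :return: A list of all alignment outcome.
--     :rtype: list
--     """
--
--     if state == "S":
--         return aln_list, [0 for _ in aln_list]
--
--     if state == "E":
--         return aln_list, [len(a[0]) for a in aln_list]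
--
--     state_list = []
--     idx = []
--     for a in aln_list:
--         i = 0
--         for k in range(len(a[0])):
--             if a[0][k] != "-":
--                 i += 1
--                 if state == "M" and pos == i and a[0][k] != "-" and a[1][k] != "-":
--                     state_list.append(a)
--                     idx.append(k)
--                     break
--                 elif state == "D" and pos == i and a[0][k] != "-" and a[1][k] == "-":
--                     state_list.append(a)
--                     idx.append(k)
--                     break
--             else:
--                 if state == "I" and pos == i and a[0][k] == "-" and a[1][k] != "-":
--                     state_list.append(a)
--                     idx.append(k)
--                     break
--     return state_list,idx
-- ===== SOURCE B (Python) =====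
-- def _hit_index(s, t, state, pos):
--     """Index appended for one alignment (s, t), or None."""
--     nongap = [k for k in range(len(s)) if s[k] != "-"]
--     if state in ("M", "D"):
--         if 1 <= pos <= len(nongap):
--             k = nongap[pos - 1]
--             if (t[k] != "-") == (state == "M"):
--                 return k
--         return None
--     if state == "I":
--         if 0 <= pos <= len(nongap):
--             lo = nongap[pos - 1] + 1 if pos >= 1 else 0
--             hi = nongap[pos] if pos < len(nongap) else len(s)
--             return next((k for k in range(lo, hi) if t[k] != "-"), None)
--         return None
--     return None
--
--
-- def find_all_alignment_of_state(aln_list, state, pos):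
--     if state == "S":
--         return aln_list, [0] * len(aln_list)
--     if state == "E":
--         return aln_list, [len(a[0]) for a in aln_list]
--     hits = []
--     for a in aln_list:
--         k = _hit_index(a[0], a[1], state, pos)
--         if k is not None:
--             hits.append((a, k))
--     return [h[0] for h in hits], [h[1] for h in hits]
-- ===== Notes on version B (the rewrite author's own statement) =====
-- stated objective: alternative
-- what changed: Instead of A's per-character scan that counts non-gaps and tests every state condition at each position, B precomputes each alignment's non-gap index list once, reads the pos-th non-gap index directly for M/D, searches only the single gap window after the pos-th non-gap for I, and collects hits as (alignment, index) pairs that are unzipped at the end.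
-- outside the precondition, e.g. on find_all_alignment_of_state([('ab', '')], 'M', 5): A returns ([], []), B returns ([], [])
import Mathlib
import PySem

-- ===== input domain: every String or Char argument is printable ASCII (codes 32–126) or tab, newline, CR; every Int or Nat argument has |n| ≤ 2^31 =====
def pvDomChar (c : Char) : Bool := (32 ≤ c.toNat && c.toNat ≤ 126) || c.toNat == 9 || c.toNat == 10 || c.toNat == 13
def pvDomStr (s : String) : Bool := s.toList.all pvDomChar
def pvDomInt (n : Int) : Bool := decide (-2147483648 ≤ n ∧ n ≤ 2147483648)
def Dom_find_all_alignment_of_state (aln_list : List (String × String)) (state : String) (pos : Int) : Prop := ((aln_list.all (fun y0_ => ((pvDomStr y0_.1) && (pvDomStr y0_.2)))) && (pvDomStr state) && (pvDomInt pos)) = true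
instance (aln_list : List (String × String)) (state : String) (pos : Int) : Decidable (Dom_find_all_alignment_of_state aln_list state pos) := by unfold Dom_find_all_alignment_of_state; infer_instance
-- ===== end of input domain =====

-- B replaces A's counting scan by direct lookup in a precomputed non-gap index list
-- (M/D: read the pos-th non-gap; I: search only the gap window after it) — an
-- alternative decomposition of the same cost; equivalence is proved on Pre_ below.


-- ===== PORT A =====
-- inner 'for k in range(len(a[0]))' loop of A with its break, consuming s and t in
-- parallel (exact on Pre_, where len(a[1]) ≥ len(a[0])); returns the appended k, if any
def pvLoopA (state : String) (pos : Int) : List Char → List Char → Nat → Int → Option Nat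
  | [], _, _, _ => none
  | _ :: _, [], _, _ => none
  | c :: s, d :: t, k, i =>
    if c ≠ '-' then
      if state = "M" ∧ pos = i + 1 ∧ c ≠ '-' ∧ d ≠ '-' then some k
      else if state = "D" ∧ pos = i + 1 ∧ c ≠ '-' ∧ d = '-' then some k
      else pvLoopA state pos s t (k + 1) (i + 1)
    else
      if state = "I" ∧ pos = i ∧ c = '-' ∧ d ≠ '-' then some k
      else pvLoopA state pos s t (k + 1) i

def find_all_alignment_of_state (aln_list : List (String × String)) (state : String) (pos : Int) : (List (String × String)) × List Int :=
  if state = "S" then (aln_list, aln_list.map (fun _ => (0 : Int)))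
  else if state = "E" then (aln_list, aln_list.map (fun a => (a.1.toList.length : Int)))
  else
    aln_list.foldl (fun acc a =>
      match pvLoopA state pos a.1.toList a.2.toList 0 0 with
      | some k => (acc.1 ++ [a], acc.2 ++ [(k : Int)])
      | none => acc) ([], [])

-- ===== PORT B =====
-- _hit_index of Source B: non-gap index list, direct lookup for M/D, gap-window search for I
def pvHitB (s t : List Char) (state : String) (pos : Int) : Option Nat :=
  let nongap := (List.range s.length).filter (fun k => s.getD k ' ' ≠ '-')
  if state = "M" ∨ state = "D" then
    if 1 ≤ pos ∧ pos ≤ (nongap.length : Int) then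
      let k := nongap.getD (pos - 1).toNat 0
      if (decide (t.getD k ' ' ≠ '-')) = (decide (state = "M")) then some k else none
    else none
  else if state = "I" then
    if 0 ≤ pos ∧ pos ≤ (nongap.length : Int) then
      let lo := if 1 ≤ pos then nongap.getD (pos - 1).toNat 0 + 1 else 0
      let hi := if pos < (nongap.length : Int) then nongap.getD pos.toNat 0 else s.length
      (List.range' lo (hi - lo)).find? (fun k => decide (t.getD k ' ' ≠ '-'))
    else none
  else none

def find_all_alignment_of_state_alt (aln_list : List (String × String)) (state : String) (pos : Int) : (List (String × String)) × List Int :=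
  if state = "S" then (aln_list, List.replicate aln_list.length (0 : Int))
  else if state = "E" then (aln_list, aln_list.map (fun a => (a.1.toList.length : Int)))
  else
    let hits := aln_list.filterMap (fun a => (pvHitB a.1.toList a.2.toList state pos).map (fun k => (a, (k : Int))))
    (hits.map (·.1), hits.map (·.2))

-- ===== PRECONDITION & SPEC =====
-- Pre_ excludes, for states "M"/"D"/"I" only, alignments whose second string is shorter
-- than the first: there Python A can raise IndexError on a[1][k] (and on some such inputs
-- it still returns, e.g. when pos is never reached — see the cite in claim.json).
def Pre_find_all_alignment_of_state (aln_list : List (String × String)) (state : String) (pos : Int) : Prop :=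
  (state = "M" ∨ state = "D" ∨ state = "I") → ∀ a ∈ aln_list, a.1.toList.length ≤ a.2.toList.length
instance (aln_list : List (String × String)) (state : String) (pos : Int) : Decidable (Pre_find_all_alignment_of_state aln_list state pos) := by unfold Pre_find_all_alignment_of_state; infer_instance

def pvWitness_find_all_alignment_of_state : (List (String × String)) × String × Int := ([("AC-G", "A-CG")], "M", 1)

def Spec_find_all_alignment_of_state (aln_list : List (String × String)) (state : String) (pos : Int) (out : (List (String × String)) × List Int) : Prop := out = find_all_alignment_of_state_alt aln_list state pos
instance (aln_list : List (String × String)) (state : String) (pos : Int) (out : (List (String × String)) × List Int) : Decidable (Spec_find_all_alignment_of_state aln_list state pos out) := by unfold Spec_find_all_alignment_of_state; infer_instance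

-- ===== CLAIM (what is proved, stated in full; the proofs are below) =====
def Claim_equal_find_all_alignment_of_state : Prop := ∀ (aln_list : List (String × String)) (state : String) (pos : Int), Dom_find_all_alignment_of_state aln_list state pos → Pre_find_all_alignment_of_state aln_list state pos → Spec_find_all_alignment_of_state aln_list state pos (find_all_alignment_of_state aln_list state pos)

-- ===== LEMMAS AND PROOFS =====

-- reference form of A's inner loop: no index/counter accumulators
def pvRef (state : String) (pos : Int) : List Char → List Char → Option Nat
  | [], _ => none
  | _ :: _, [] => none
  | c :: s, d :: t =>
    if c ≠ '-' then
      if state = "M" ∧ pos = 1 ∧ d ≠ '-' then some 0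
      else if state = "D" ∧ pos = 1 ∧ d = '-' then some 0
      else (pvRef state (pos - 1) s t).map (· + 1)
    else
      if state = "I" ∧ pos = 0 ∧ d ≠ '-' then some 0
      else (pvRef state pos s t).map (· + 1)

-- recursive characterisation of B's non-gap index list
def pvNg : List Char → List Nat
  | [] => []
  | c :: s => if c ≠ '-' then 0 :: (pvNg s).map (· + 1) else (pvNg s).map (· + 1)

-- pvHitB with the filter replaced by pvNg (pvNg_eq below justifies it)
def pvHitB' (s t : List Char) (state : String) (pos : Int) : Option Nat :=
  let nongap := pvNg s
  if state = "M" ∨ state = "D" then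
    if 1 ≤ pos ∧ pos ≤ (nongap.length : Int) then
      let k := nongap.getD (pos - 1).toNat 0
      if (decide (t.getD k ' ' ≠ '-')) = (decide (state = "M")) then some k else none
    else none
  else if state = "I" then
    if 0 ≤ pos ∧ pos ≤ (nongap.length : Int) then
      let lo := if 1 ≤ pos then nongap.getD (pos - 1).toNat 0 + 1 else 0
      let hi := if pos < (nongap.length : Int) then nongap.getD pos.toNat 0 else s.length
      (List.range' lo (hi - lo)).find? (fun k => decide (t.getD k ' ' ≠ '-'))
    else none
  else none

theorem pv_map_add_shift (k : Nat) (o : Option Nat) :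
    Option.map (fun x => x + (1 + k)) o = Option.map (fun x => x + k) (Option.map (fun x => x + 1) o) := by
  cases o <;> simp
  omega

theorem pvLoopA_eq_ref (state : String) (pos : Int) : ∀ (s t : List Char) (k : Nat) (i : Int),
    pvLoopA state pos s t k i = (pvRef state (pos - i) s t).map (· + k) := by
  intro s
  induction s with
  | nil => intro t k i; cases t <;> rfl
  | cons c s ih =>
    intro t k i
    cases t with
    | nil => rfl
    | cons d t =>
      simp only [pvLoopA, pvRef, ih,
        show (pos = i + 1) ↔ (pos - i = 1) from by omega,
        show (pos = i) ↔ (pos - i = 0) from by omega,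
        show pos - (i + 1) = pos - i - 1 from by omega]
      by_cases hc : c = '-' <;>
        simp [hc] <;> split_ifs <;>
        first
          | tauto
          | (rw [show (fun x : Nat => x + (k + 1)) = (fun x : Nat => x + (1 + k)) from by funext x; omega]; try rw [pv_map_add_shift])
          | simp_all

theorem pvNg_eq (s : List Char) :
    (List.range s.length).filter (fun k => s.getD k ' ' ≠ '-') = pvNg s := by
  induction s with
  | nil => rfl
  | cons c s ih =>
    simp only [pvNg, List.length_cons, List.range_succ_eq_map, List.filter_cons,
      List.filter_map, List.getD_cons_zero]
    rw [show ((fun k => decide (List.getD (c :: s) k ' ' ≠ '-')) ∘ Nat.succ) = (fun k => decide (List.getD s k ' ' ≠ '-')) from by funext k; simp]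
    rw [ih]
    by_cases hc : c = '-' <;> simp [hc]

theorem pvHitB_eq' (s t : List Char) (state : String) (pos : Int) :
    pvHitB s t state pos = pvHitB' s t state pos := by
  simp only [pvHitB, pvHitB', pvNg_eq]

theorem pv_mapgetD (l : List Nat) (m : Nat) (h : m < l.length) :
    (l.map (· + 1)).getD m 0 = l.getD m 0 + 1 := by
  rw [List.getD_eq_getElem _ _ (by simpa using h), List.getD_eq_getElem _ _ h, List.getElem_map]

theorem pv_range'_shift : ∀ (n a : Nat), List.range' (a + 1) n = (List.range' a n).map (· + 1) := by
  intro n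
  induction n with
  | zero => intro a; rfl
  | succ n ih =>
    intro a
    rw [List.range'_succ, List.range'_succ, List.map_cons, ih]

-- shift lemmas for pvHitB'
theorem pv_pred_shift (d : Char) (t : List Char) :
    ((fun k => decide (List.getD (d :: t) k ' ' ≠ '-')) ∘ (· + 1)) = (fun k => decide (List.getD t k ' ' ≠ '-')) := by
  funext k; simp [List.getD_cons_succ]

theorem pv_shift_gap (s t : List Char) (d : Char) (state : String) (pos : Int)
    (h : ¬ (state = "I" ∧ pos = 0)) :
    pvHitB' ('-' :: s) (d :: t) state pos = (pvHitB' s t state pos).map (· + 1) := by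
  have hng : pvNg ('-' :: s) = (pvNg s).map (· + 1) := by rw [pvNg, if_neg (by simp)]
  simp only [pvHitB', hng, List.length_map, List.length_cons]
  by_cases hMD : state = "M" ∨ state = "D"
  · rw [if_pos hMD, if_pos hMD]
    by_cases hr : 1 ≤ pos ∧ pos ≤ ((pvNg s).length : Int)
    · rw [if_pos hr, if_pos hr]
      have hm : (pos - 1).toNat < (pvNg s).length := by omega
      rw [pv_mapgetD _ _ hm, List.getD_cons_succ]
      by_cases ht : decide (List.getD t ((pvNg s).getD (pos - 1).toNat 0) ' ' ≠ '-') = decide (state = "M")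
      · rw [if_pos ht, if_pos ht]; rfl
      · rw [if_neg ht, if_neg ht]; rfl
    · rw [if_neg hr, if_neg hr]; rfl
  · rw [if_neg hMD, if_neg hMD]
    by_cases hI : state = "I"
    · rw [if_pos hI, if_pos hI]
      by_cases hr : 0 ≤ pos ∧ pos ≤ ((pvNg s).length : Int)
      · rw [if_pos hr, if_pos hr]
        have hpos : 1 ≤ pos := by
          have : pos ≠ 0 := fun hp => h ⟨hI, hp⟩
          omega
        rw [if_pos hpos, if_pos hpos, pv_mapgetD _ _ (by omega)]
        by_cases hhi : pos < ((pvNg s).length : Int)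
        · rw [if_pos hhi, if_pos hhi, pv_mapgetD _ _ (by omega)]
          rw [show (pvNg s).getD pos.toNat 0 + 1 - ((pvNg s).getD (pos - 1).toNat 0 + 1 + 1)
              = (pvNg s).getD pos.toNat 0 - ((pvNg s).getD (pos - 1).toNat 0 + 1) from by omega]
          rw [pv_range'_shift, List.find?_map, pv_pred_shift d t]
        · rw [if_neg hhi, if_neg hhi]
          rw [show s.length + 1 - ((pvNg s).getD (pos - 1).toNat 0 + 1 + 1)
              = s.length - ((pvNg s).getD (pos - 1).toNat 0 + 1) from by omega]
          rw [pv_range'_shift, List.find?_map, pv_pred_shift d t]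
      · rw [if_neg hr, if_neg hr]; rfl
    · rw [if_neg hI, if_neg hI]; rfl

theorem pv_base_I_gap (s t : List Char) (d : Char) :
    pvHitB' ('-' :: s) (d :: t) "I" 0 =
      (if d ≠ '-' then some 0 else (pvHitB' s t "I" 0).map (· + 1)) := by
  have hng : pvNg ('-' :: s) = (pvNg s).map (· + 1) := by rw [pvNg, if_neg (by simp)]
  have hsI : ¬(("I" : String) = "M" ∨ ("I" : String) = "D") := by simp
  have hr : (0 : Int) ≤ 0 ∧ (0 : Int) ≤ ((pvNg s).length : Int) := ⟨le_refl 0, by omega⟩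
  have h10 : ¬ (1 : Int) ≤ (0 : Int) := by omega
  simp only [pvHitB', hng, List.length_map, List.length_cons]
  rw [if_neg hsI, if_neg hsI, if_pos (trivial : True), if_pos (trivial : True), if_pos hr, if_pos hr,
      if_neg h10, if_neg h10]
  by_cases hhi : (0 : Int) < ((pvNg s).length : Int)
  · rw [if_pos hhi, if_pos hhi, pv_mapgetD _ _ (by omega)]
    rw [show (pvNg s).getD (Int.toNat 0) 0 + 1 - 0 = ((pvNg s).getD (Int.toNat 0) 0 - 0) + 1 from by omega,
        List.range'_succ]
    by_cases hd : d = '-'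
    · rw [List.find?_cons_of_neg (by simp [hd]), if_neg (by simp [hd])]
      rw [pv_range'_shift, List.find?_map, pv_pred_shift d t]
    · rw [List.find?_cons_of_pos (by simp [hd]), if_pos (by simp [hd])]
  · rw [if_neg hhi, if_neg hhi]
    rw [show s.length + 1 - 0 = (s.length - 0) + 1 from by omega, List.range'_succ]
    by_cases hd : d = '-'
    · rw [List.find?_cons_of_neg (by simp [hd]), if_neg (by simp [hd])]
      rw [pv_range'_shift, List.find?_map, pv_pred_shift d t]
    · rw [List.find?_cons_of_pos (by simp [hd]), if_pos (by simp [hd])]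

theorem pv_shift_nongap (c : Char) (s t : List Char) (d : Char) (state : String) (pos : Int)
    (hc : ¬ c = '-') (h : ¬ ((state = "M" ∨ state = "D") ∧ pos = 1)) :
    pvHitB' (c :: s) (d :: t) state pos = (pvHitB' s t state (pos - 1)).map (· + 1) := by
  have hng : pvNg (c :: s) = 0 :: (pvNg s).map (· + 1) := by rw [pvNg, if_pos hc]
  simp only [pvHitB', hng, List.length_cons, List.length_map]
  by_cases hMD : state = "M" ∨ state = "D"
  · rw [if_pos hMD, if_pos hMD]
    have hp1 : pos ≠ 1 := fun hp => h ⟨hMD, hp⟩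
    by_cases hr : 1 ≤ pos - 1 ∧ pos - 1 ≤ ((pvNg s).length : Int)
    · rw [if_pos (by omega : 1 ≤ pos ∧ pos ≤ ((((pvNg s).length + 1 : Nat)) : Int)), if_pos hr]
      rw [show (pos - 1).toNat = (pos - 2).toNat + 1 from by omega, List.getD_cons_succ,
          pv_mapgetD _ _ (by omega), List.getD_cons_succ,
          show pos - 1 - 1 = pos - 2 from by omega]
      by_cases ht : decide (List.getD t ((pvNg s).getD (pos - 2).toNat 0) ' ' ≠ '-') = decide (state = "M")
      · rw [if_pos ht, if_pos ht]; rfl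
      · rw [if_neg ht, if_neg ht]; rfl
    · rw [if_neg (by omega : ¬ (1 ≤ pos ∧ pos ≤ ((((pvNg s).length + 1 : Nat)) : Int))), if_neg hr]; rfl
  · rw [if_neg hMD, if_neg hMD]
    by_cases hI : state = "I"
    · rw [if_pos hI, if_pos hI]
      by_cases hp0 : pos = 0
      · subst hp0
        rw [if_pos (by omega : (0:Int) ≤ 0 ∧ (0:Int) ≤ ((((pvNg s).length + 1 : Nat)) : Int)),
            if_neg (by omega : ¬ ((0:Int) ≤ 0 - 1 ∧ 0 - 1 ≤ ((pvNg s).length : Int)))]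
        rw [if_neg (by omega : ¬ (1:Int) ≤ 0), if_pos (by omega : (0:Int) < ((((pvNg s).length + 1 : Nat)) : Int))]
        rfl
      · by_cases hr : 0 ≤ pos - 1 ∧ pos - 1 ≤ ((pvNg s).length : Int)
        · rw [if_pos (by omega : 0 ≤ pos ∧ pos ≤ ((((pvNg s).length + 1 : Nat)) : Int)), if_pos hr]
          have hpos1 : (1:Int) ≤ pos := by omega
          rw [if_pos hpos1]
          -- lo_L = lo_R + 1
          have hlo : (0 :: (pvNg s).map (· + 1)).getD (pos - 1).toNat 0 + 1
              = (if 1 ≤ pos - 1 then (pvNg s).getD (pos - 1 - 1).toNat 0 + 1 else 0) + 1 := by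
            by_cases hp2 : (2:Int) ≤ pos
            · rw [show (pos - 1).toNat = (pos - 2).toNat + 1 from by omega, List.getD_cons_succ,
                  pv_mapgetD _ _ (by omega), if_pos (by omega : 1 ≤ pos - 1),
                  show pos - 1 - 1 = pos - 2 from by omega]
            · rw [show pos = 1 from by omega]
              norm_num
          rw [hlo]
          -- hi_L = hi_R + 1
          have hhi : (if pos < ((((pvNg s).length + 1 : Nat)) : Int) then (0 :: (pvNg s).map (· + 1)).getD pos.toNat 0 else s.length + 1)
              = (if pos - 1 < ((pvNg s).length : Int) then (pvNg s).getD (pos - 1).toNat 0 else s.length) + 1 := by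
            by_cases hh : pos - 1 < ((pvNg s).length : Int)
            · rw [if_pos (by omega : pos < ((((pvNg s).length + 1 : Nat)) : Int)), if_pos hh,
                  show pos.toNat = (pos - 1).toNat + 1 from by omega, List.getD_cons_succ,
                  pv_mapgetD _ _ (by omega)]
            · rw [if_neg (by omega : ¬ pos < ((((pvNg s).length + 1 : Nat)) : Int)), if_neg hh]
          rw [hhi]
          rw [show ((if pos - 1 < ((pvNg s).length : Int) then (pvNg s).getD (pos - 1).toNat 0 else s.length) + 1)
                - ((if 1 ≤ pos - 1 then (pvNg s).getD (pos - 1 - 1).toNat 0 + 1 else 0) + 1)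
              = (if pos - 1 < ((pvNg s).length : Int) then (pvNg s).getD (pos - 1).toNat 0 else s.length)
                - (if 1 ≤ pos - 1 then (pvNg s).getD (pos - 1 - 1).toNat 0 + 1 else 0) from by omega]
          rw [pv_range'_shift, List.find?_map, pv_pred_shift d t]
        · rw [if_neg (by omega : ¬ (0 ≤ pos ∧ pos ≤ ((((pvNg s).length + 1 : Nat)) : Int))), if_neg hr]; rfl
    · rw [if_neg hI, if_neg hI]; rfl

theorem pv_base_MD_nongap (c : Char) (s t : List Char) (d : Char) (state : String)
    (hc : ¬ c = '-') (hMD : state = "M" ∨ state = "D") :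
    pvHitB' (c :: s) (d :: t) state 1 =
      (if decide (d ≠ '-') = decide (state = "M") then some 0 else none) := by
  have hng : pvNg (c :: s) = 0 :: (pvNg s).map (· + 1) := by rw [pvNg, if_pos hc]
  simp only [pvHitB', hng, List.length_cons, List.length_map]
  rw [if_pos hMD, if_pos (by omega : (1:Int) ≤ 1 ∧ (1:Int) ≤ ((((pvNg s).length + 1 : Nat)) : Int))]
  norm_num

theorem pvRef_MD_nonpos (state : String) (hMD : state = "M" ∨ state = "D") :
    ∀ (s t : List Char) (pos : Int), pos ≤ 0 → pvRef state pos s t = none := by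
  intro s
  induction s with
  | nil => intro t pos _; cases t <;> rfl
  | cons c s ih =>
    intro t pos hp
    cases t with
    | nil => rfl
    | cons d t =>
      simp only [pvRef]
      by_cases hcc : ¬ c = '-'
      · rw [if_pos hcc, if_neg (by rintro ⟨_, h2, _⟩; omega),
            if_neg (by rintro ⟨_, h2, _⟩; omega), ih t (pos - 1) (by omega)]
        rfl
      · rw [if_neg hcc,
            if_neg (by rintro ⟨hI, _, _⟩; rcases hMD with hh | hh <;> (rw [hh] at hI; simp at hI)),
            ih t pos hp]
        rfl

theorem pvHitB'_eq_ref (state : String) :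
    ∀ (s t : List Char) (pos : Int), s.length ≤ t.length → pvHitB' s t state pos = pvRef state pos s t := by
  intro s
  induction s with
  | nil =>
    intro t pos _
    have hL : pvHitB' [] t state pos = none := by
      simp only [pvHitB', pvNg]
      split_ifs <;> simp_all <;> omega
    rw [hL]; cases t <;> rfl
  | cons c s ih =>
    intro t pos h
    cases t with
    | nil => simp at h
    | cons d t =>
      have ht : s.length ≤ t.length := by simpa using h
      by_cases hc : c = '-'
      · subst hc
        by_cases hI0 : state = "I" ∧ pos = 0
        · obtain ⟨hI, hp⟩ := hI0
          subst hI; subst hp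
          rw [pv_base_I_gap]
          simp only [pvRef]
          rw [if_neg (show ¬ ('-' : Char) ≠ '-' from fun hx => hx rfl)]
          by_cases hd : d = '-'
          · rw [if_neg (show ¬ (True ∧ True ∧ d ≠ '-') from fun hx => hx.2.2 hd),
                if_neg (show ¬ (d ≠ '-') from fun hx => hx hd), ih t 0 ht]
          · rw [if_pos hd, if_pos (⟨trivial, trivial, hd⟩ : True ∧ True ∧ d ≠ '-')]
        · rw [pv_shift_gap s t d state pos hI0]
          simp only [pvRef]
          rw [if_neg (by simp), if_neg (fun hx => hI0 ⟨hx.1, hx.2.1⟩), ih t pos ht]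
      · by_cases hMD1 : (state = "M" ∨ state = "D") ∧ pos = 1
        · obtain ⟨hMD, hp⟩ := hMD1
          subst hp
          rw [pv_base_MD_nongap c s t d state hc hMD]
          simp only [pvRef]
          rw [if_pos hc]
          rcases hMD with hM | hD
          · subst hM
            by_cases hd : d = '-'
            · have h1 : ¬ (decide (d ≠ '-') = decide (("M":String) = "M")) := by simp [hd]
              have h2 : ¬ (("M":String) = "M" ∧ True ∧ d ≠ '-') := by
                rintro ⟨_, _, hx⟩; exact hx hd
              have h3 : ¬ (("M":String) = "D" ∧ True ∧ d = '-') := by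
                rintro ⟨hx, _, _⟩; simp at hx
              rw [if_neg h1, if_neg h2, if_neg h3,
                  pvRef_MD_nonpos "M" (Or.inl rfl) s t (1 - 1) (by omega)]
              rfl
            · have h1 : decide (d ≠ '-') = decide (("M":String) = "M") := by simp [hd]
              have h2 : ("M":String) = "M" ∧ True ∧ d ≠ '-' := ⟨rfl, trivial, hd⟩
              rw [if_pos h1, if_pos h2]
          · subst hD
            by_cases hd : d = '-'
            · have h1 : decide (d ≠ '-') = decide (("D":String) = "M") := by simp [hd]
              have h2 : ¬ (("D":String) = "M" ∧ True ∧ d ≠ '-') := by rintro ⟨hx, _, _⟩; simp at hx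
              have h3 : ("D":String) = "D" ∧ True ∧ d = '-' := ⟨rfl, trivial, hd⟩
              rw [if_pos h1, if_neg h2, if_pos h3]
            · have h1 : ¬ (decide (d ≠ '-') = decide (("D":String) = "M")) := by simp [hd]
              have h2 : ¬ (("D":String) = "M" ∧ True ∧ d ≠ '-') := by rintro ⟨hx, _, _⟩; simp at hx
              have h3 : ¬ (("D":String) = "D" ∧ True ∧ d = '-') := by rintro ⟨_, _, hx⟩; exact hd hx
              rw [if_neg h1, if_neg h2, if_neg h3,
                  pvRef_MD_nonpos "D" (Or.inr rfl) s t (1 - 1) (by omega)]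
              rfl
        · rw [pv_shift_nongap c s t d state pos hc hMD1]
          simp only [pvRef]
          rw [if_pos hc,
              if_neg (fun hx => hMD1 ⟨Or.inl hx.1, hx.2.1⟩),
              if_neg (fun hx => hMD1 ⟨Or.inr hx.1, hx.2.1⟩),
              ih t (pos - 1) ht]

-- other states: both inner computations return nothing
theorem pvRef_other (state : String) (h1 : state ≠ "M") (h2 : state ≠ "D") (h3 : state ≠ "I") :
    ∀ (s t : List Char) (pos : Int), pvRef state pos s t = none := by
  intro s
  induction s with
  | nil => intro t pos; cases t <;> rfl
  | cons c s ih =>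
    intro t pos
    cases t with
    | nil => rfl
    | cons d t =>
      simp only [pvRef]
      by_cases hc : ¬ c = '-'
      · rw [if_pos hc, if_neg (fun hx => h1 hx.1), if_neg (fun hx => h2 hx.1), ih t (pos - 1)]
        rfl
      · rw [if_neg hc, if_neg (fun hx => h3 hx.1), ih t pos]
        rfl

theorem pvHitB'_other (s t : List Char) (state : String) (pos : Int)
    (h1 : state ≠ "M") (h2 : state ≠ "D") (h3 : state ≠ "I") :
    pvHitB' s t state pos = none := by
  simp only [pvHitB']
  rw [if_neg (fun hx => hx.elim h1 h2), if_neg h3]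

theorem pv_map_add_zero (o : Option Nat) : Option.map (fun x => x + 0) o = o := by
  cases o <;> rfl

-- the inner computations agree wherever the claim needs them to
theorem pv_inner_eq (state : String) (pos : Int) (s t : List Char)
    (hlen : (state = "M" ∨ state = "D" ∨ state = "I") → s.length ≤ t.length) :
    pvLoopA state pos s t 0 0 = pvHitB s t state pos := by
  rw [pvLoopA_eq_ref state pos s t 0 0, show pos - 0 = pos from by omega, pv_map_add_zero,
      pvHitB_eq']
  by_cases hMDI : state = "M" ∨ state = "D" ∨ state = "I"
  · rw [pvHitB'_eq_ref state s t pos (hlen hMDI)]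
  · have h1 : state ≠ "M" := fun hx => hMDI (Or.inl hx)
    have h2 : state ≠ "D" := fun hx => hMDI (Or.inr (Or.inl hx))
    have h3 : state ≠ "I" := fun hx => hMDI (Or.inr (Or.inr hx))
    rw [pvRef_other state h1 h2 h3, pvHitB'_other s t state pos h1 h2 h3]

-- A's append-in-a-loop is the unzip of B's filterMap
theorem pvFoldl_eq_filterMap (state : String) (pos : Int) :
    ∀ (l : List (String × String)) (acc : List (String × String) × List Int),
    l.foldl (fun acc a =>
      match pvLoopA state pos a.1.toList a.2.toList 0 0 with
      | some k => (acc.1 ++ [a], acc.2 ++ [(k : Int)])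
      | none => acc) acc
    = (acc.1 ++ (l.filterMap (fun a => (pvLoopA state pos a.1.toList a.2.toList 0 0).map (fun k => (a, (k : Int))))).map (·.1),
       acc.2 ++ (l.filterMap (fun a => (pvLoopA state pos a.1.toList a.2.toList 0 0).map (fun k => (a, (k : Int))))).map (·.2)) := by
  intro l
  induction l with
  | nil => intro acc; simp
  | cons a l ih =>
    intro acc
    simp only [List.foldl_cons, List.filterMap_cons]
    cases hA : pvLoopA state pos a.1.toList a.2.toList 0 0 with
    | none => rw [ih]; simp
    | some k => rw [ih]; simp

-- ===== VERDICT (by name: the statement is the Claim_ definition above) =====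
theorem find_all_alignment_of_state_spec : Claim_equal_find_all_alignment_of_state := by
  intro aln_list state pos _ hpre
  unfold Spec_find_all_alignment_of_state
  unfold find_all_alignment_of_state find_all_alignment_of_state_alt
  by_cases hS : state = "S"
  · rw [if_pos hS, if_pos hS]
    simp
  · rw [if_neg hS, if_neg hS]
    by_cases hE : state = "E"
    · rw [if_pos hE, if_pos hE]
    · rw [if_neg hE, if_neg hE]
      rw [pvFoldl_eq_filterMap state pos aln_list ([], [])]
      simp only [List.nil_append]
      have : aln_list.filterMap (fun a => (pvLoopA state pos a.1.toList a.2.toList 0 0).map (fun k => (a, (k : Int))))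
          = aln_list.filterMap (fun a => (pvHitB a.1.toList a.2.toList state pos).map (fun k => (a, (k : Int)))) := by
        apply List.filterMap_congr
        intro a ha
        rw [pv_inner_eq state pos a.1.toList a.2.toList (fun hMDI => hpre (by tauto) a ha)]
      rw [this]
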